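-- pv_equiv track=rewrite | github.com/alchupin/leetcode | yandex_algorithm_training/linear_search/water_in_lowlands.py | count_from_left
-- ===== SOURCE A (Python) =====
-- def count_from_left(seq):
--     result_sum = 0
--     current_max = seq[0]
--     for i in range(len(seq)):
--         if seq[i] > current_max:
--             current_max = seq[i]
--         elif seq[i] < current_max:
--             result_sum += current_max - seq[i]
--     return result_sum
-- ===== SOURCE B (Python) =====
-- def count_from_left(seq):
--     prefix = []
--     m = None
--     for x in seq:
--         m = x if (m is None or x > m) else m
--         prefix.append(m)
--     return sum(m - x for m, x in zip(prefix, seq))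
-- ===== Notes on version B (the rewrite author's own statement) =====
-- stated objective: alternative
-- what changed: B materializes the running prefix-maximum list in a first pass and then sums the deficits max-x over zip(prefix, seq) in a second pass, instead of A's single index loop interleaving max-update with conditional accumulation.
-- outside the precondition, e.g. on count_from_left([]): A raises IndexError, B returns 0
import Mathlib
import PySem

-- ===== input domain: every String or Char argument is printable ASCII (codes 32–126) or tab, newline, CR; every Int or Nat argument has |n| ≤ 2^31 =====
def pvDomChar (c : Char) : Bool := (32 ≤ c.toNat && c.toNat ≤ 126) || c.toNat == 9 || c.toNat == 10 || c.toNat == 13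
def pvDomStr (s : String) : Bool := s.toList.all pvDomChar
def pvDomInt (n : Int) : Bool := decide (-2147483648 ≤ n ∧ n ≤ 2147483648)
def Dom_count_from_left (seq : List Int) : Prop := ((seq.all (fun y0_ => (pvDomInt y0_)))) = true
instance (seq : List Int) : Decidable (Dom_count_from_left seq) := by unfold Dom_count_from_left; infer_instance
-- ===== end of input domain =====

-- B replaces A's single index loop (interleaved max-update + conditional accumulation) by a
-- two-pass decomposition: build the prefix-maximum list, then sum the deficits over zip.

-- ===== PORT A =====
def count_from_left (seq : List Int) : Int :=
  -- result_sum = 0; current_max = seq[0]  (seq[0] raises on []; Pre_ excludes that)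
  -- for i in range(len(seq)): …  (state = (result_sum, current_max), initially (0, seq[0]))
  (( PySem.List.pyRange 0 (seq.length : Int) 1).foldl
    (fun (st : Int × Int) (i : Int) =>
      if PySem.List.pyGetD seq i 0 > st.2 then (st.1, PySem.List.pyGetD seq i 0)
      else if PySem.List.pyGetD seq i 0 < st.2 then (st.1 + (st.2 - PySem.List.pyGetD seq i 0), st.2)
      else st) ((0 : Int), PySem.List.pyGetD seq 0 0)).1

-- ===== PORT B =====
-- first pass of Source B: the running prefix-maximum list (m = None initially)
def pvPrefixMax : List Int → Option Int → List Int
  | [], _ => []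
  | x :: xs, m =>
    let m' : Int := match m with
      | none => x
      | some m0 => if x > m0 then x else m0
    m' :: pvPrefixMax xs (some m')

def count_from_left_alt (seq : List Int) : Int :=
  ((pvPrefixMax seq none).zip seq).foldl (fun s p => s + (p.1 - p.2)) 0

-- ===== PRECONDITION & SPEC =====
-- Pre_ excludes only the empty list, on which A raises IndexError (seq[0]).
def Pre_count_from_left (seq : List Int) : Prop := seq ≠ []
instance (seq : List Int) : Decidable (Pre_count_from_left seq) := by unfold Pre_count_from_left; infer_instance
def pvWitness_count_from_left : List Int := [2, 1, 3]

def Spec_count_from_left (seq : List Int) (out : Int) : Prop := out = count_from_left_alt seq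
instance (seq : List Int) (out : Int) : Decidable (Spec_count_from_left seq out) := by unfold Spec_count_from_left; infer_instance

-- ===== CLAIM (what is proved, stated in full; the proofs are below) =====
def Claim_equal_count_from_left : Prop := ∀ (seq : List Int), Dom_count_from_left seq → Pre_count_from_left seq → Spec_count_from_left seq (count_from_left seq)

-- ===== LEMMAS AND PROOFS =====

-- A's per-element step and B's deficit-summing step agree up to the common shift of the accumulator.
theorem pv_key (t : List Int) (m acc s : Int) :
    (t.foldl
      (fun (st : Int × Int) (x : Int) =>
        if x > st.2 then (st.1, x)
        else if x < st.2 then (st.1 + (st.2 - x), st.2)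
        else st) (acc, m)).1 - acc
    = ((pvPrefixMax t (some m)).zip t).foldl (fun s p => s + (p.1 - p.2)) s - s := by
  induction t generalizing m acc s with
  | nil => simp [pvPrefixMax]
  | cons x t ih =>
    simp only [pvPrefixMax, List.zip_cons_cons, List.foldl_cons]
    by_cases h1 : x > m
    · simp only [if_pos h1]
      have := ih x acc (s + (x - x))
      omega
    · simp only [if_neg h1]
      by_cases h2 : x < m
      · simp only [if_pos h2]
        have := ih m (acc + (m - x)) (s + (m - x))
        omega
      · simp only [if_neg h2]
        have hx : x = m := by omega
        subst hx
        have := ih x acc (s + (x - x))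
        omega

theorem pv_main (seq : List Int) (hne : seq ≠ []) :
    count_from_left seq = count_from_left_alt seq := by
  obtain ⟨h, t, rfl⟩ : ∃ h t, seq = h :: t := by
    cases seq with
    | nil => exact absurd rfl hne
    | cons h t => exact ⟨h, t, rfl⟩
  unfold count_from_left count_from_left_alt
  rw [PySem.List.foldl_pyRange_zero_pyGetD' (h :: t) 0
    (fun (st : Int × Int) (x : Int) =>
      if x > st.2 then (st.1, x)
      else if x < st.2 then (st.1 + (st.2 - x), st.2)
      else st) _]
  have hget : PySem.List.pyGetD (h :: t) 0 0 = h := by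
    simp [PySem.List.pyGetD, PySem.List.pyIdx?, PySem.List.pyGet?]
  rw [hget]
  simp only [List.foldl_cons, pvPrefixMax, List.zip_cons_cons]
  have hstep : (if h > h then ((0 : Int), h)
      else if h < h then ((0 : Int) + (h - h), h) else ((0 : Int), h)) = (0, h) := by
    simp
  rw [hstep]
  have := pv_key t h 0 (0 + (h - h))
  omega

-- ===== VERDICT (by name: the statement is the Claim_ definition above) =====
theorem count_from_left_spec : Claim_equal_count_from_left := by
  intro seq _ hpre
  exact pv_main seq hpre
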